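-- pv_equiv track=rewrite | github.com/RiyadSheikh27/Competitive-Programming-2.0 | Using Python/problem_2060A.py | max_valid_sequences
-- ===== SOURCE A (Python) =====
-- def max_valid_sequences(a):
--     mx = 0
--     for i in range(-100, 101):
--         a[2] = i
--         cnt = 0
--         if a[2] == a[1] + a[0]:
--             cnt += 1
--         if a[3] == a[2] + a[1]:
--             cnt += 1
--         if a[4] == a[3] + a[2]:
--             cnt += 1
--         mx = max(mx, cnt)
--     return mx
-- ===== SOURCE B (Python) =====
-- def max_valid_sequences(a):
--     # Return-value equivalent to A; unlike A we do not mutate a[2] (A leaves a[2]=100).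
--     # Each condition holds for exactly one choice of a[2]: a[0]+a[1], a[3]-a[1], a[4]-a[3].
--     targets = [a[0] + a[1], a[3] - a[1], a[4] - a[3]]
--     c = [t for t in targets if -100 <= t <= 100]
--     best = 0
--     for t in c:
--         best = max(best, c.count(t))
--     return best
-- ===== Notes on version B (the rewrite author's own statement) =====
-- stated objective: simpler
-- what changed: Replaces the 201-iteration scan over all choices of a[2] by directly computing the three unique candidate values that satisfy each condition, filtering them to [-100,100], and returning the largest multiplicity among them.
import Mathlib
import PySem

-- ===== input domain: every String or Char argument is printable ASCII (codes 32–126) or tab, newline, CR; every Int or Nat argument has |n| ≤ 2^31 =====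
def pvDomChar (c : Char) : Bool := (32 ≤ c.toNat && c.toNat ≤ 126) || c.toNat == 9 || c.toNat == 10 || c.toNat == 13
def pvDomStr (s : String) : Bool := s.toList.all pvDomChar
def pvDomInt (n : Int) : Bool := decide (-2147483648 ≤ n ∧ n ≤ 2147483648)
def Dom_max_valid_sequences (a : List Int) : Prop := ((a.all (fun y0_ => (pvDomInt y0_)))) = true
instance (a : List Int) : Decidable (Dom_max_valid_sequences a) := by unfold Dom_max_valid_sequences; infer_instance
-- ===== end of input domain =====

-- B computes the three candidate values for a[2] directly instead of scanning all 201 choices;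
-- A also mutates a[2] in place (leaving a[2] = 100), a side effect B does not perform — the claim is about the return value.

-- ===== PORT A =====
-- literal port of A's loop: state = (the list with a[2] overwritten, mx); indices 0..4 are
-- in range exactly on Pre_ (length ≥ 5), where pyGetD _ _ 0 equals Python's a[k].
-- A's loop body: a[2] = i, then count the three conditions and take the running max
def pvStepA (st : List Int × Int) (i : Int) : List Int × Int :=
  let a := st.1.set 2 i
  let cnt : Int :=
    (if PySem.List.pyGetD a 2 0 = PySem.List.pyGetD a 1 0 + PySem.List.pyGetD a 0 0 then 1 else 0)
    + (if PySem.List.pyGetD a 3 0 = PySem.List.pyGetD a 2 0 + PySem.List.pyGetD a 1 0 then 1 else 0)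
    + (if PySem.List.pyGetD a 4 0 = PySem.List.pyGetD a 3 0 + PySem.List.pyGetD a 2 0 then 1 else 0)
  (a, max st.2 cnt)

def max_valid_sequences (a : List Int) : Int :=
  ((PySem.List.pyRange (-100) 101 1).foldl pvStepA (a, 0)).2

-- ===== PORT B =====
def max_valid_sequences_alt (a : List Int) : Int :=
  let targets : List Int :=
    [PySem.List.pyGetD a 0 0 + PySem.List.pyGetD a 1 0,
     PySem.List.pyGetD a 3 0 - PySem.List.pyGetD a 1 0,
     PySem.List.pyGetD a 4 0 - PySem.List.pyGetD a 3 0]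
  let c := targets.filter (fun t => decide (-100 ≤ t ∧ t ≤ 100))
  c.foldl (fun best t => max best ((PySem.List.count c t : Int))) 0

-- ===== PRECONDITION & SPEC =====
-- Pre_: Python A raises IndexError when len(a) < 5 (a[2] = i needs len ≥ 3, reading a[3]/a[4] needs len ≥ 5); B raises there too.
def Pre_max_valid_sequences (a : List Int) : Prop := 5 ≤ a.length
instance (a : List Int) : Decidable (Pre_max_valid_sequences a) := by unfold Pre_max_valid_sequences; infer_instance
def pvWitness_max_valid_sequences : List Int := [1, 2, 0, 5, 8]

def Spec_max_valid_sequences (a : List Int) (out : Int) : Prop := out = max_valid_sequences_alt a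
instance (a : List Int) (out : Int) : Decidable (Spec_max_valid_sequences a out) := by unfold Spec_max_valid_sequences; infer_instance

-- ===== CLAIM (what is proved, stated in full; the proofs are below) =====
def Claim_equal_max_valid_sequences : Prop := ∀ (a : List Int), Dom_max_valid_sequences a → Pre_max_valid_sequences a → Spec_max_valid_sequences a (max_valid_sequences a)

-- ===== LEMMAS AND PROOFS =====

-- the number of conditions satisfied in A's loop body when a[2] = i, in terms of the fixed entries
def pvG (x0 x1 x3 x4 i : Int) : Int :=
  (if i = x1 + x0 then 1 else 0) + (if x3 = i + x1 then 1 else 0) + (if x4 = x3 + i then 1 else 0)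

-- B's filtered candidate list
def pvC (x0 x1 x3 x4 : Int) : List Int :=
  [x0 + x1, x3 - x1, x4 - x3].filter (fun t => decide (-100 ≤ t ∧ t ≤ 100))

theorem pv_foldA (x0 x1 x3 x4 : Int) (r : List Int) (l : List Int) :
    ∀ (c m : Int),
    ((l.foldl pvStepA (x0::x1::c::x3::x4::r, m)).2)
    = l.foldl (fun m i => max m (pvG x0 x1 x3 x4 i)) m := by
  induction l with
  | nil => intro c m; rfl
  | cons hd tl ih =>
    intro c m
    have hstep : pvStepA (x0::x1::c::x3::x4::r, m) hd
        = (x0::x1::hd::x3::x4::r, max m (pvG x0 x1 x3 x4 hd)) := by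
      simp [pvStepA, pvG, PySem.List.pyGetD_ofNat']
    simp only [List.foldl_cons, hstep]
    exact ih hd (max m (pvG x0 x1 x3 x4 hd))

theorem pv_g_eq_count (x0 x1 x3 x4 i : Int) (h1 : -100 ≤ i) (h2 : i ≤ 100) :
    pvG x0 x1 x3 x4 i = (PySem.List.count (pvC x0 x1 x3 x4) i : Int) := by
  simp only [pvG, pvC, PySem.List.count_eq, List.count, List.countP_filter,
    List.countP_cons, List.countP_nil, Bool.and_eq_true, beq_iff_eq, decide_eq_true_eq]
  split_ifs <;> omega

theorem pv_foldl_max_proj_mem (f : Int → Int) (l : List Int) :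
    ∀ (m : Int), l.foldl (fun b t => max b (f t)) m = m ∨
      ∃ t ∈ l, l.foldl (fun b t => max b (f t)) m = f t := by
  induction l with
  | nil => intro m; left; rfl
  | cons hd tl ih =>
    intro m
    simp only [List.foldl_cons]
    rcases ih (max m (f hd)) with h | ⟨t, ht, he⟩
    · rw [h]
      rcases max_choice m (f hd) with h' | h'
      · left; exact h'
      · right; exact ⟨hd, by simp, h'⟩
    · right; exact ⟨t, by simp [ht], he⟩

theorem max_valid_sequences_spec : Claim_equal_max_valid_sequences := by
  intro a _ hpre
  unfold Spec_max_valid_sequences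
  rcases a with _ | ⟨x0, _ | ⟨x1, _ | ⟨x2, _ | ⟨x3, _ | ⟨x4, r⟩⟩⟩⟩⟩ <;>
    simp only [Pre_max_valid_sequences, List.length_nil, List.length_cons] at hpre <;>
    try omega
  -- rewrite both sides into fold form
  have hA : max_valid_sequences (x0::x1::x2::x3::x4::r)
      = (PySem.List.pyRange (-100) 101 1).foldl (fun m i => max m (pvG x0 x1 x3 x4 i)) 0 := by
    unfold max_valid_sequences
    exact pv_foldA x0 x1 x3 x4 r _ x2 0
  have hB : max_valid_sequences_alt (x0::x1::x2::x3::x4::r)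
      = (pvC x0 x1 x3 x4).foldl (fun b t => max b ((PySem.List.count (pvC x0 x1 x3 x4) t : Int))) 0 := by
    simp [max_valid_sequences_alt, pvC, PySem.List.pyGetD_ofNat']
  rw [hA, hB]
  set c := pvC x0 x1 x3 x4 with hc
  set L := (PySem.List.pyRange (-100) 101 1).foldl (fun m i => max m (pvG x0 x1 x3 x4 i)) 0 with hL
  set R := c.foldl (fun b t => max b ((PySem.List.count c t : Int))) 0 with hR
  have hLbounds := PySem.List.le_foldl_max_int (PySem.List.pyRange (-100) 101 1) (pvG x0 x1 x3 x4) 0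
  have hRbounds := PySem.List.le_foldl_max_int c (fun t => (PySem.List.count c t : Int)) 0
  have hmemc : ∀ t ∈ c, -100 ≤ t ∧ t ≤ 100 := by
    intro t ht
    have := List.of_mem_filter ht
    simpa using this
  apply le_antisymm
  · -- L ≤ R
    rcases pv_foldl_max_proj_mem (pvG x0 x1 x3 x4) (PySem.List.pyRange (-100) 101 1) 0 with h | ⟨i, hi, he⟩
    · rw [← hL] at h; rw [h]; exact hRbounds.1
    · rw [← hL] at he; rw [he]
      have hir : -100 ≤ i ∧ i < 101 := PySem.List.mem_pyRange_one.mp hi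
      rw [pv_g_eq_count x0 x1 x3 x4 i hir.1 (by omega)]
      by_cases hic : i ∈ c
      · exact hRbounds.2 i hic
      · have : PySem.List.count c i = 0 := by
          rw [PySem.List.count_eq]
          exact List.count_eq_zero.mpr hic
        rw [this]
        exact_mod_cast hRbounds.1
  · -- R ≤ L
    rcases pv_foldl_max_proj_mem (fun t => (PySem.List.count c t : Int)) c 0 with h | ⟨t, ht, he⟩
    · rw [← hR] at h; rw [h]; exact hLbounds.1
    · rw [← hR] at he; rw [he]
      obtain ⟨h1, h2⟩ := hmemc t ht
      rw [← pv_g_eq_count x0 x1 x3 x4 t h1 h2]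
      exact hLbounds.2 t (PySem.List.mem_pyRange_one.mpr ⟨h1, by omega⟩)
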